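-- pv_equiv track=rewrite | github.com/MiltonMenchaca/VulnHunter | src/core/utils/utils.py | validate_port_range
-- ===== SOURCE A (Python) =====
-- def validate_port_range(port_range):
--     """
--     Validates a port range.
--     Accepts formats such as:
--     - Single port: 80
--     - Port range: 80-100
--     - List of ports: 80,443,8080
--     """
--     try:
--         # If it is a hyphenated range
--         if '-' in port_range:
--             start_port, end_port = map(int, port_range.split('-'))
--             if not (1 <= start_port <= 65535 and 1 <= end_port <= 65535 and start_port <= end_port):
--                 return False
--         # If it is a comma-separated list of ports
--         elif ',' in port_range:
--             for port in port_range.split(','):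
--                 port = int(port.strip())
--                 if not 1 <= port <= 65535:
--                     return False
--         # If it is a single port
--         else:
--             port = int(port_range)
--             if not 1 <= port <= 65535:
--                 return False
--         return True
--     except ValueError:
--         return False
-- ===== SOURCE B (Python) =====
-- def validate_port_range(port_range):
--     """
--     Validates a port range (same accepted formats as the original):
--     single port '80', range '80-100', comma list '80,443,8080'.
--     Single-pass tokenizer: choose the separator, scan the characters once,
--     convert each finished token with int(), and track count / in-range flag /
--     first and last values; no split(), no unpacking, no branch per format.
--     """
--     sep = '-' if '-' in port_range else ','
--     ok = True
--     count = 0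
--     first = last = None
--     token = ''
--     for ch in port_range + sep:
--         if ch == sep:
--             try:
--                 v = int(token)
--             except ValueError:
--                 return False
--             if not 1 <= v <= 65535:
--                 ok = False
--             if first is None:
--                 first = v
--             last = v
--             count += 1
--             token = ''
--         else:
--             token += ch
--     if sep == '-':
--         return ok and count == 2 and first <= last
--     return ok
-- ===== Notes on version B (the rewrite author's own statement) =====
-- stated objective: alternative
-- what changed: B replaces A's three-way branch of split()/unpack/loop by a single-pass character tokenizer: it appends one sentinel separator, scans the string once converting each finished token with int() while tracking a token count, an in-range flag and the first and last values, then applies one final check per separator kind; there is no split(), no unpacking and no per-format parsing branch.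
import Mathlib
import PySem

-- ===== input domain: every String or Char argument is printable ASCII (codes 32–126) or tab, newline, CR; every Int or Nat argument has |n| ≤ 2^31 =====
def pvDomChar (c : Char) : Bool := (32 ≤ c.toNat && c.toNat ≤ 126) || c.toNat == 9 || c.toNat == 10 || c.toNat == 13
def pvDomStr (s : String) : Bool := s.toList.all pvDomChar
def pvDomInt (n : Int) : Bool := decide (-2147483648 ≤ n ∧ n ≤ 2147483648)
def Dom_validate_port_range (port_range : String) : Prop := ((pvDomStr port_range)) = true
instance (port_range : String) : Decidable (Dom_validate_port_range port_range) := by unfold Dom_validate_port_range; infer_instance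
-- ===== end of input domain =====

-- B replaces A's three-way split/unpack/loop branching by one single-pass character
-- tokenizer (sentinel-terminated scan tracking count / in-range flag / first / last).

-- ===== PORT A =====
-- helper: 1 <= p <= 65535
def pvA_inRange (p : Int) : Bool := decide (1 ≤ p) && decide (p ≤ 65535)

-- the 'for port in port_range.split(',')' loop with early 'return False';
-- int(port.strip()) raising ValueError is the none branch (caught by the except → False)
def pvA_loop : List (List Char) → Bool
  | [] => true
  | p :: rest =>
    match PySem.Int.ofChars? (PySem.Chars.strip p) with
    | some port => if !(pvA_inRange port) then false else pvA_loop rest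
    | none => false

def validate_port_range (port_range : String) : Bool :=
  let cs := port_range.toList
  if PySem.Chars.isIn ['-'] cs then
    -- start_port, end_port = map(int, port_range.split('-')): a part count ≠ 2 or a
    -- failing int() raises ValueError, caught by the except → False
    match PySem.Chars.splitOn cs ['-'] with
    | [a, b] =>
      match PySem.Int.ofChars? a, PySem.Int.ofChars? b with
      | some start_port, some end_port =>
        if !(pvA_inRange start_port && pvA_inRange end_port && decide (start_port ≤ end_port))
        then false else true
      | _, _ => false
    | _ => false
  else if PySem.Chars.isIn [','] cs then
    pvA_loop (PySem.Chars.splitOn cs [','])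
  else
    match PySem.Int.ofChars? cs with
    | some port => if !(pvA_inRange port) then false else true
    | none => false

-- ===== PORT B =====
def pvB_range (v : Int) : Bool := decide (1 ≤ v ∧ v ≤ 65535)

-- the 'for ch in port_range + sep' scan: state = (token, count, ok, first, last);
-- none = the early 'return False' on int() ValueError
def pvB_scan (sep : Char) : List Char → List Char → Nat → Bool → Option Int → Option Int →
    Option (Nat × Bool × Option Int × Option Int)
  | [], _token, count, ok, first, last => some (count, ok, first, last)
  | c :: rest, token, count, ok, first, last =>
    if c == sep then
      match PySem.Int.ofChars? token with
      | none => none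
      | some v =>
        pvB_scan sep rest [] (count + 1)
          (if !(pvB_range v) then false else ok)
          (if first = none then some v else first)
          (some v)
    else
      pvB_scan sep rest (token ++ [c]) count ok first last

def validate_port_range_alt (port_range : String) : Bool :=
  let cs := port_range.toList
  let sep := if PySem.Chars.isIn ['-'] cs then '-' else ','
  match pvB_scan sep (cs ++ [sep]) [] 0 true none none with
  | none => false
  | some (count, ok, first, last) =>
    if sep == '-' then
      -- 'ok and count == 2 and first <= last'; first/last are set whenever count == 2
      ok && (count == 2) &&
        (match first with
         | none => false
         | some f =>
           match last with
           | none => false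
           | some l => decide (f ≤ l))
    else ok

-- ===== PRECONDITION & SPEC =====
def Spec_validate_port_range (port_range : String) (out : Bool) : Prop := out = validate_port_range_alt port_range
instance (port_range : String) (out : Bool) : Decidable (Spec_validate_port_range port_range out) := by unfold Spec_validate_port_range; infer_instance

-- ===== CLAIM (what is proved, stated in full; the proofs are below) =====
def Claim_equal_validate_port_range : Prop := ∀ (port_range : String), Dom_validate_port_range port_range → Spec_validate_port_range port_range (validate_port_range port_range)

-- ===== LEMMAS AND PROOFS =====

-- dropWhile only looks at the predicate's values on the list
theorem pv_dropWhile_congr {p q : Char → Bool} : ∀ (l : List Char),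
    (∀ x ∈ l, p x = q x) → List.dropWhile p l = List.dropWhile q l
  | [], _ => rfl
  | c :: l, h => by
    simp only [List.dropWhile_cons, h c (by simp)]
    cases hq : q c
    · simp
    · simp [pv_dropWhile_congr l (fun x hx => h x (by simp [hx]))]

-- on the ASCII domain Python's str-whitespace and int()-whitespace coincide
theorem pv_isspace_eq_isIntSpace (c : Char) (h : pvDomChar c = true) :
    PySem.Chars.isspace c = PySem.Int.isIntSpace c := by
  have hchar : ∀ d : Char, (c = d) = (c.toNat = d.toNat) := by
    intro d
    apply propext
    exact ⟨fun h => by rw [h], fun h => Char.ext (UInt32.toNat_inj.mp h)⟩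
  simp only [pvDomChar, Bool.or_eq_true, Bool.and_eq_true, decide_eq_true_eq, beq_iff_eq] at h
  rw [Bool.eq_iff_iff]
  simp only [PySem.Chars.isspace, PySem.Int.isIntSpace, Bool.or_eq_true, Bool.and_eq_true,
    decide_eq_true_eq, hchar,
    show (' ' : Char).toNat = 32 from rfl, show ('\t' : Char).toNat = 9 from rfl,
    show ('\n' : Char).toNat = 10 from rfl, show ('\x0d' : Char).toNat = 13 from rfl,
    show ('\x0b' : Char).toNat = 11 from rfl, show ('\x0c' : Char).toNat = 12 from rfl]
  omega

-- the internal whitespace-stripping of int(): cs in the definition of ofChars?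
def pvS (l : List Char) : List Char :=
  (List.dropWhile PySem.Int.isIntSpace (List.dropWhile PySem.Int.isIntSpace l).reverse).reverse

theorem pv_strip_eq_pvS (l : List Char) (h : ∀ x ∈ l, pvDomChar x = true) :
    PySem.Chars.strip l = pvS l := by
  have h1 : List.dropWhile PySem.Chars.isspace l = List.dropWhile PySem.Int.isIntSpace l :=
    pv_dropWhile_congr l (fun x hx => pv_isspace_eq_isIntSpace x (h x hx))
  have h2 : List.dropWhile PySem.Chars.isspace (List.dropWhile PySem.Int.isIntSpace l).reverse
      = List.dropWhile PySem.Int.isIntSpace (List.dropWhile PySem.Int.isIntSpace l).reverse :=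
    pv_dropWhile_congr _ (fun x hx =>
      pv_isspace_eq_isIntSpace x (h x ((List.dropWhile_suffix _).subset (List.mem_reverse.mp hx))))
  simp only [PySem.Chars.strip, PySem.Chars.lstrip, PySem.Chars.rstrip, pvS, h1, h2]

theorem pv_dropWhile_pvS (P : Char → Bool) (l : List Char) :
    List.dropWhile P (List.dropWhile P (List.dropWhile P l).reverse).reverse =
      (List.dropWhile P (List.dropWhile P l).reverse).reverse := by
  rw [List.dropWhile_eq_self_iff]
  intro hl
  have htm : (List.dropWhile P (List.dropWhile P l).reverse).reverse <+: List.dropWhile P l := by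
    simpa using (List.dropWhile_suffix (l := (List.dropWhile P l).reverse) P).reverse
  have hm0 : 0 < (List.dropWhile P l).length := Nat.lt_of_lt_of_le hl htm.length_le
  have hmne : List.dropWhile P l ≠ [] := List.ne_nil_of_length_pos hm0
  rw [htm.getElem hl]
  simp only [List.getElem_zero, List.head_dropWhile_not]
  simp

theorem pv_pvS_idem (l : List Char) : pvS (pvS l) = pvS l := by
  show (List.dropWhile PySem.Int.isIntSpace
      (List.dropWhile PySem.Int.isIntSpace (pvS l)).reverse).reverse = pvS l
  rw [show List.dropWhile PySem.Int.isIntSpace (pvS l) = pvS l from pv_dropWhile_pvS _ l]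
  have h2 : (pvS l).reverse
      = List.dropWhile PySem.Int.isIntSpace (List.dropWhile PySem.Int.isIntSpace l).reverse := by
    simp [pvS]
  rw [h2, List.dropWhile_idempotent]
  rfl

-- int(s) ignores surrounding whitespace: int(s.strip()) == int(s) on the ASCII domain
theorem pv_ofChars?_strip (l : List Char) (h : ∀ x ∈ l, pvDomChar x = true) :
    PySem.Int.ofChars? (PySem.Chars.strip l) = PySem.Int.ofChars? l := by
  rw [pv_strip_eq_pvS l h]
  show PySem.Int.ofChars? (pvS l) = PySem.Int.ofChars? l
  simp only [PySem.Int.ofChars?]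
  rw [show (List.dropWhile PySem.Int.isIntSpace
        (List.dropWhile PySem.Int.isIntSpace (pvS l)).reverse).reverse = pvS l from pv_pvS_idem l]
  rfl

-- recursive single-character split (proof-side model of split(sep))
def pvSplit1 (sep : Char) : List Char → List (List Char)
  | [] => [[]]
  | c :: rest => if c = sep then [] :: pvSplit1 sep rest
                 else (pvSplit1 sep rest).modifyHead (c :: ·)

theorem pvSplit1_ne_nil (sep : Char) : ∀ (l : List Char), pvSplit1 sep l ≠ []
  | [] => by simp [pvSplit1]
  | c :: rest => by
    simp only [pvSplit1]
    split_ifs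
    · simp
    · simpa using fun h => (pvSplit1_ne_nil sep rest) (by simpa using congrArg List.length h)

-- splitOn's fuel worker, characterised for a single-character separator
theorem pv_go_eq_pvSplit1 (sep : Char) : ∀ (fuel : Nat) (l cur : List Char)
    (acc : List (List Char)), l.length < fuel →
    PySem.Chars.splitOn.go [sep] fuel l cur acc
      = acc.reverse ++ (pvSplit1 sep l).modifyHead (cur.reverse ++ ·)
  | fuel + 1, [], cur, acc, _ => by
    rw [PySem.Chars.splitOn.go.eq_def]
    simp [pvSplit1]
  | fuel + 1, c :: rest, cur, acc, hfuel => by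
    rw [PySem.Chars.splitOn.go.eq_def]
    simp only []
    by_cases hc : c = sep
    · have hpre : List.isPrefixOf [sep] (c :: rest) = true := by
        simp [List.isPrefixOf_iff_prefix, hc]
      simp only [hpre, if_true, List.length_cons, List.length_nil, List.drop_succ_cons,
        List.drop_zero]
      rw [pv_go_eq_pvSplit1 sep fuel rest [] (cur.reverse :: acc) (by simpa using hfuel)]
      cases hr : pvSplit1 sep rest with
      | nil => exact absurd hr (pvSplit1_ne_nil sep rest)
      | cons h t => simp [pvSplit1, hc, hr]
    · have hpre : List.isPrefixOf [sep] (c :: rest) = false := by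
        rw [Bool.eq_false_iff]
        intro hp
        have := (List.isPrefixOf_iff_prefix.mp hp)
        simp at this
        exact hc this.symm
      simp only [hpre, Bool.false_eq_true, if_false]
      rw [pv_go_eq_pvSplit1 sep fuel rest (c :: cur) acc (by simpa using hfuel)]
      simp only [pvSplit1, if_neg hc]
      cases hr : pvSplit1 sep rest with
      | nil => exact absurd hr (pvSplit1_ne_nil sep rest)
      | cons h t => simp [hr]

theorem pv_splitOn_eq_pvSplit1 (sep : Char) (cs : List Char) :
    PySem.Chars.splitOn cs [sep] = pvSplit1 sep cs := by
  rw [PySem.Chars.splitOn, pv_go_eq_pvSplit1 sep (cs.length + 1) cs [] [] (by omega)]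
  cases hr : pvSplit1 sep cs with
  | nil => exact absurd hr (pvSplit1_ne_nil sep cs)
  | cons h t => simp

-- proof-side fold over the finished token list, same state as pvB_scan
def pvFold : List (List Char) → Nat → Bool → Option Int → Option Int →
    Option (Nat × Bool × Option Int × Option Int)
  | [], count, ok, first, last => some (count, ok, first, last)
  | t :: ts, count, ok, first, last =>
    match PySem.Int.ofChars? t with
    | none => none
    | some v =>
      pvFold ts (count + 1) (if !(pvB_range v) then false else ok)
        (if first = none then some v else first) (some v)

-- the character scan equals the fold over the split tokens
theorem pv_scan_eq_fold (sep : Char) : ∀ (cs token : List Char) (count : Nat) (ok : Bool)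
    (first last : Option Int),
    pvB_scan sep (cs ++ [sep]) token count ok first last
      = pvFold ((pvSplit1 sep cs).modifyHead (token ++ ·)) count ok first last
  | [], token, count, ok, first, last => by
    simp [pvB_scan, pvFold, pvSplit1]
  | c :: rest, token, count, ok, first, last => by
    by_cases hc : c = sep
    · simp only [List.cons_append, pvB_scan, hc, beq_self_eq_true, if_true]
      cases hv : PySem.Int.ofChars? token with
      | none => simp [pvSplit1, pvFold, hv]
      | some v =>
        have hrec := pv_scan_eq_fold sep rest [] (count + 1)
          (if !(pvB_range v) then false else ok)
          (if first = none then some v else first) (some v)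
        simp only []
        rw [hrec]
        cases hr : pvSplit1 sep rest with
        | nil => exact absurd hr (pvSplit1_ne_nil sep rest)
        | cons h t => simp [pvSplit1, pvFold, hv, hr]
    · have hbeq : (c == sep) = false := by simp [hc]
      simp only [List.cons_append, pvB_scan, hbeq, Bool.false_eq_true, if_false]
      rw [pv_scan_eq_fold sep rest (token ++ [c]) _ _ _ _]
      cases hr : pvSplit1 sep rest with
      | nil => exact absurd hr (pvSplit1_ne_nil sep rest)
      | cons h t => simp [pvSplit1, hc, hr]

-- the fold counts exactly the tokens it consumed
theorem pv_fold_count : ∀ (parts : List (List Char)) (count : Nat) (ok : Bool)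
    (first last : Option Int) (c2 : Nat) (ok2 : Bool) (f2 l2 : Option Int),
    pvFold parts count ok first last = some (c2, ok2, f2, l2) → c2 = count + parts.length
  | [], count, ok, first, last, c2, ok2, f2, l2, h => by
    simp [pvFold] at h
    simp [h.1]
  | t :: ts, count, ok, first, last, c2, ok2, f2, l2, h => by
    simp only [pvFold] at h
    cases hv : PySem.Int.ofChars? t with
    | none => simp [hv] at h
    | some v =>
      rw [hv] at h
      have := pv_fold_count ts (count + 1) _ _ _ c2 ok2 f2 l2 h
      simp [this]
      omega

-- every character of a split token is a character of the original string
theorem pvSplit1_mem (sep : Char) : ∀ (cs : List Char) (p : List Char),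
    p ∈ pvSplit1 sep cs → ∀ x ∈ p, x ∈ cs
  | [], p, hp, x, hx => by
    simp [pvSplit1] at hp
    subst hp
    simp at hx
  | c :: rest, p, hp, x, hx => by
    simp only [pvSplit1] at hp
    by_cases hc : c = sep
    · rw [if_pos hc] at hp
      rcases List.mem_cons.mp hp with h | h
      · subst h; simp at hx
      · exact List.mem_cons_of_mem _ (pvSplit1_mem sep rest p h x hx)
    · rw [if_neg hc] at hp
      cases hr : pvSplit1 sep rest with
      | nil => exact absurd hr (pvSplit1_ne_nil sep rest)
      | cons h0 t =>
        rw [hr] at hp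
        simp only [List.modifyHead_cons] at hp
        rcases List.mem_cons.mp hp with h | h
        · subst h
          rcases List.mem_cons.mp hx with h | h
          · simp [h]
          · exact List.mem_cons_of_mem _
              (pvSplit1_mem sep rest h0 (by simp [hr]) x h)
        · exact List.mem_cons_of_mem _ (pvSplit1_mem sep rest p (by simp [hr, h]) x hx)

-- split of a separator-free string is the whole string
theorem pvSplit1_no_sep (sep : Char) : ∀ (cs : List Char), sep ∉ cs → pvSplit1 sep cs = [cs]
  | [], _ => rfl
  | c :: rest, h => by
    have hc : ¬ c = sep := fun e => h (by simp [e])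
    simp [pvSplit1, hc, pvSplit1_no_sep sep rest (fun m => h (by simp [m]))]

theorem pv_ok_eq (p : Int) : pvA_inRange p = pvB_range p := by
  by_cases h1 : (1 : Int) ≤ p <;> by_cases h2 : p ≤ 65535 <;> simp [pvA_inRange, pvB_range, h1, h2]

-- part count ≠ 2 forces B's dash-side verdict to False
theorem pv_fold_ne_two (M : Option Int → Option Int → Bool) :
    ∀ (parts : List (List Char)) (count : Nat) (ok : Bool) (first last : Option Int),
    count + parts.length ≠ 2 →
    (match pvFold parts count ok first last with
     | none => false
     | some (c, ok', f', l') => ok' && (c == 2) && M f' l') = false := by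
  intro parts count ok first last hne
  cases hr : pvFold parts count ok first last with
  | none => rfl
  | some q =>
    obtain ⟨c, ok', f', l'⟩ := q
    have := pv_fold_count parts count ok first last c ok' f' l' hr
    have hc : (c == 2) = false := by simp; omega
    simp [hc]

-- A's early-return comma loop against B's fold (ok-flag threading), on the ASCII domain
theorem pv_loop_eq_fold : ∀ (parts : List (List Char)) (count : Nat) (ok : Bool)
    (first last : Option Int), (∀ p ∈ parts, ∀ x ∈ p, pvDomChar x = true) →
    (match pvFold parts count ok first last with
     | none => false
     | some (_, ok', _, _) => ok') = (ok && pvA_loop parts)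
  | [], count, ok, first, last, _ => by simp [pvFold, pvA_loop]
  | p :: rest, count, ok, first, last, h => by
    have hst : PySem.Int.ofChars? (PySem.Chars.strip p) = PySem.Int.ofChars? p :=
      pv_ofChars?_strip p (h p (by simp))
    simp only [pvFold, pvA_loop, hst]
    cases hv : PySem.Int.ofChars? p with
    | none => simp
    | some v =>
      rw [pv_loop_eq_fold rest (count + 1) _ _ _ (fun q hq => h q (by simp [hq]))]
      cases hb : pvB_range v <;> cases ok <;> simp [pvA_loop, pv_ok_eq, hb]

-- ===== VERDICT (by name: the statement is the Claim_ definition above) =====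
theorem validate_port_range_spec : Claim_equal_validate_port_range := by
  intro s hdom
  have hd : ∀ x ∈ s.toList, pvDomChar x = true := by
    have := hdom
    unfold Dom_validate_port_range pvDomStr at this
    exact fun x hx => List.all_eq_true.mp this x hx
  unfold Spec_validate_port_range validate_port_range validate_port_range_alt
  simp only []
  by_cases hdash : PySem.Chars.isIn ['-'] s.toList = true
  · simp only [hdash, if_true]
    rw [pv_scan_eq_fold '-' s.toList [] 0 true none none]
    have hmh : (pvSplit1 '-' s.toList).modifyHead (([] : List Char) ++ ·)
        = pvSplit1 '-' s.toList := by
      cases hr : pvSplit1 '-' s.toList with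
      | nil => exact absurd hr (pvSplit1_ne_nil '-' s.toList)
      | cons h t => simp
    rw [hmh, pv_splitOn_eq_pvSplit1 '-' s.toList]
    simp only [show ('-' == '-') = true from rfl, if_true]
    cases hparts : pvSplit1 '-' s.toList with
    | nil => exact absurd hparts (pvSplit1_ne_nil '-' s.toList)
    | cons a t =>
      cases t with
      | nil =>
        rw [pv_fold_ne_two _ [a] 0 true none none (by simp)]
      | cons b t2 =>
        cases t2 with
        | nil =>
          simp only [pvFold]
          cases hva : PySem.Int.ofChars? a with
          | none => simp
          | some va =>
            cases hvb : PySem.Int.ofChars? b with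
            | none => simp
            | some vb =>
              cases h1 : pvB_range va <;> cases h2 : pvB_range vb <;>
                cases h3 : decide (va ≤ vb) <;>
                simp [pvFold, pv_ok_eq, h1, h2, h3]
        | cons c t3 =>
          rw [pv_fold_ne_two _ (a :: b :: c :: t3) 0 true none none (by simp)]
  · simp only [hdash, Bool.false_eq_true, if_false]
    have hscan := pv_scan_eq_fold ',' s.toList [] 0 true none none
    have hmh : (pvSplit1 ',' s.toList).modifyHead (([] : List Char) ++ ·)
        = pvSplit1 ',' s.toList := by
      cases hr : pvSplit1 ',' s.toList with
      | nil => exact absurd hr (pvSplit1_ne_nil ',' s.toList)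
      | cons h t => simp
    rw [hscan, hmh]
    simp only [show ((',' : Char) == '-') = false from rfl, Bool.false_eq_true, if_false]
    by_cases hcomma : PySem.Chars.isIn [','] s.toList = true
    · simp only [hcomma, if_true]
      rw [pv_splitOn_eq_pvSplit1 ',' s.toList]
      have hparts_dom : ∀ p ∈ pvSplit1 ',' s.toList, ∀ x ∈ p, pvDomChar x = true :=
        fun p hp x hx => hd x (pvSplit1_mem ',' s.toList p hp x hx)
      have := pv_loop_eq_fold (pvSplit1 ',' s.toList) 0 true none none hparts_dom
      cases hr : pvFold (pvSplit1 ',' s.toList) 0 true none none with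
      | none =>
        rw [hr] at this
        simp at this
        simp [← this]
      | some q =>
        obtain ⟨c, ok', f', l'⟩ := q
        rw [hr] at this
        simp at this
        simp [← this]
    · simp only [hcomma, Bool.false_eq_true, if_false]
      have hnotin : (',' : Char) ∉ s.toList := by
        intro hm
        apply hcomma
        rw [PySem.Chars.isIn_iff_infix]
        obtain ⟨l1, l2, hsplit⟩ := List.append_of_mem hm
        exact ⟨l1, l2, by simp [hsplit]⟩
      rw [pvSplit1_no_sep ',' s.toList hnotin]
      cases hv : PySem.Int.ofChars? s.toList with
      | none => simp [pvFold, hv]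
      | some v =>
        cases hb : pvB_range v <;> simp [pvFold, hv, pv_ok_eq, hb]
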